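-- pv_equiv track=rewrite | github.com/Antonis8/Probabilistic-Nomogram | example_template/src/back-end/get_axis_coords.py | getTickCoords
-- ===== SOURCE A (Python) =====
-- import heapq
--
-- def getTickCoords(VAR_LEVELS = 3, TICK_LEVELS = 2, data = None):
--     Axis_ticks = {}
--     for i in range(VAR_LEVELS):
--
--         start_idx= i*TICK_LEVELS
--         end_idx = start_idx + TICK_LEVELS
--         if i==1:
--             sorted_axis_ticks= merge_n_sorted_lists(data[start_idx:end_idx])[::-1]
--         else:
--             sorted_axis_ticks= merge_n_sorted_lists(data[start_idx:end_idx])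
--
--         axis_name= "Axis " + str(i+1)
--         Axis_ticks[axis_name] = sorted_axis_ticks
--
--     return(Axis_ticks)
--
-- def merge_n_sorted_lists(lists):
--     """
--     :param lists: List of sorted lists
--     :return: A single sorted list
--     """
--     return list(heapq.merge(*lists))
-- ===== SOURCE B (Python) =====
-- def getTickCoords(VAR_LEVELS=3, TICK_LEVELS=2, data=None):
--     return {"Axis " + str(i + 1): _axis_ticks(i, TICK_LEVELS, data)
--             for i in range(VAR_LEVELS)}
--
-- def _axis_ticks(i, TICK_LEVELS, data):
--     merged = _kway_merge(data[i * TICK_LEVELS : i * TICK_LEVELS + TICK_LEVELS])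
--     return merged[::-1] if i == 1 else merged
--
-- def _kway_merge(lists):
--     # hand-written repeated-min k-way merge over index cursors; ties go to the
--     # earliest list, matching heapq.merge's argument-order tie-break
--     idx = [0] * len(lists)
--     out = []
--     while True:
--         best = -1
--         best_v = None
--         for j, (lst, c) in enumerate(zip(lists, idx)):
--             if c < len(lst) and (best < 0 or lst[c] < best_v):
--                 best, best_v = j, lst[c]
--         if best < 0:
--             return out
--         out.append(best_v)
--         idx[best] += 1
-- ===== Notes on version B (the rewrite author's own statement) =====
-- stated objective: alternative
-- what changed: The heapq.merge library call is replaced by a hand-written k-way merge that keeps an index cursor per input list and repeatedly scans the current heads for the minimum (ties to the earliest list, matching heapq.merge's argument-order tie-break); the result dict is built by a comprehension.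
import Mathlib
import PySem

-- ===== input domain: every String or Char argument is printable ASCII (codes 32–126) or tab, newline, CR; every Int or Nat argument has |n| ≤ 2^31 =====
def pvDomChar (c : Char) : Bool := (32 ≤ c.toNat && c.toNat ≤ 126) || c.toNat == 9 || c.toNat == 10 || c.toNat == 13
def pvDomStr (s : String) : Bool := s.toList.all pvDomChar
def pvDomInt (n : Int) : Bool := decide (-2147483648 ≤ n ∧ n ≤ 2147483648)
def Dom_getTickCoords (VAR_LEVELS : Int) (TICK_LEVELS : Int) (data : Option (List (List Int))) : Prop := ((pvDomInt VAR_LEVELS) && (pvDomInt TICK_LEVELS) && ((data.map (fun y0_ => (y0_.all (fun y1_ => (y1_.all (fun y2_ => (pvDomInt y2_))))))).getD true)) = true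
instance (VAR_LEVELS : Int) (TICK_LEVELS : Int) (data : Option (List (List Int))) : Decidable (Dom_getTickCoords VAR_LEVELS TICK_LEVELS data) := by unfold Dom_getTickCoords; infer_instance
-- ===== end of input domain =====

-- B replaces the heapq.merge library call by a hand-written cursor-based repeated-min
-- k-way merge (ties to the earliest list, as heapq.merge breaks them); same output.


-- ===== PORT A =====
-- hand-written exact model of list(heapq.merge(*lists)) (PySem has no heapq): the heap always
-- holds the current head of each non-exhausted iterator, so each step yields the smallest
-- current head, ties broken by earliest argument position; fuel = total length + 1 is enough
-- for the loop to exhaust every list.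
def pvSelMinA (hs : List (Nat × Int)) : Option (Nat × Int) :=
  hs.foldl (fun acc p =>
    match acc with
    | none => some p
    | some q => if p.2 < q.2 then some p else some q) none

def pvHeadsA (lists : List (List Int)) : List (Nat × Int) :=
  lists.zipIdx.filterMap (fun p => p.1.head?.map (fun v => (p.2, v)))

def pvTailAt (lists : List (List Int)) (i : Nat) : List (List Int) :=
  lists.zipIdx.map (fun p => if p.2 = i then p.1.tail else p.1)

def pvMergeA : Nat → List (List Int) → List Int
  | 0, _ => []
  | fuel + 1, lists =>
    match pvSelMinA (pvHeadsA lists) with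
    | none => []
    | some (i, v) => v :: pvMergeA fuel (pvTailAt lists i)

def merge_n_sorted_lists (lists : List (List Int)) : List Int :=
  pvMergeA ((lists.map List.length).sum + 1) lists

-- data is subscripted only by slicing; Pre_ excludes data = None with VAR_LEVELS > 0 (a Python
-- TypeError), so the .getD [] value is never the one the claim is about.
def getTickCoords (VAR_LEVELS : Int) (TICK_LEVELS : Int) (data : Option (List (List Int))) : List (String × List Int) :=
  ((PySem.List.pyRange 0 VAR_LEVELS 1).foldl
    (fun (d : PySem.Dict String (List Int)) i =>
      let start_idx := i * TICK_LEVELS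
      let end_idx := start_idx + TICK_LEVELS
      let sorted_axis_ticks :=
        if i = 1 then
          ((PySem.List.slice? (merge_n_sorted_lists
              (PySem.List.slice (data.getD []) (some start_idx) (some end_idx))) none none (-1)).getD [])
        else
          merge_n_sorted_lists (PySem.List.slice (data.getD []) (some start_idx) (some end_idx))
      d.insert ("Axis " ++ PySem.Int.toStr (i + 1)) sorted_axis_ticks)
    PySem.Dict.empty).items

-- ===== PORT B =====
-- one scan over the zipped (list, cursor) pairs picks the smallest current head (earliest list on ties)
def pvBestB (lists : List (List Int)) (idx : List Nat) : Option (Nat × Int) :=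
  (lists.zip idx).zipIdx.foldl (fun best q =>
    if q.1.2 < q.1.1.length then
      let v := q.1.1.getD q.1.2 0
      match best with
      | none => some (q.2, v)
      | some b => if v < b.2 then some (q.2, v) else some b
    else best) none

-- the while-loop of _kway_merge; each pass appends one element, so total length + 1 passes suffice
def pvMergeB : Nat → List (List Int) → List Nat → List Int
  | 0, _, _ => []
  | fuel + 1, lists, idx =>
    match pvBestB lists idx with
    | none => []
    | some (j, v) => v :: pvMergeB fuel lists (idx.set j (idx.getD j 0 + 1))

def pvKwayMerge (lists : List (List Int)) : List Int :=
  pvMergeB ((lists.map List.length).sum + 1) lists (List.replicate lists.length 0)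

def pvAxisTicks (i : Int) (TICK_LEVELS : Int) (data : Option (List (List Int))) : List Int :=
  let merged := pvKwayMerge (PySem.List.slice (data.getD []) (some (i * TICK_LEVELS)) (some (i * TICK_LEVELS + TICK_LEVELS)))
  if i = 1 then merged.reverse else merged

-- the dict comprehension builds the dict key by key over range(VAR_LEVELS)
def getTickCoords_alt (VAR_LEVELS : Int) (TICK_LEVELS : Int) (data : Option (List (List Int))) : List (String × List Int) :=
  ((PySem.List.pyRange 0 VAR_LEVELS 1).foldl
    (fun (d : PySem.Dict String (List Int)) i =>
      d.insert ("Axis " ++ PySem.Int.toStr (i + 1)) (pvAxisTicks i TICK_LEVELS data))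
    PySem.Dict.empty).items

-- ===== PRECONDITION & SPEC =====
-- Pre_ excludes only data = None with VAR_LEVELS > 0, where Python A (and B) raise TypeError on data[...]
def Pre_getTickCoords (VAR_LEVELS : Int) (TICK_LEVELS : Int) (data : Option (List (List Int))) : Prop :=
  0 < VAR_LEVELS → data ≠ none
instance (VAR_LEVELS : Int) (TICK_LEVELS : Int) (data : Option (List (List Int))) : Decidable (Pre_getTickCoords VAR_LEVELS TICK_LEVELS data) := by unfold Pre_getTickCoords; infer_instance

def pvWitness_getTickCoords : Int × Int × Option (List (List Int)) :=
  (3, 2, some [[1, 3], [2], [0, 5], [4], [1], [2]])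

def Spec_getTickCoords (VAR_LEVELS : Int) (TICK_LEVELS : Int) (data : Option (List (List Int))) (out : List (String × List Int)) : Prop := out = getTickCoords_alt VAR_LEVELS TICK_LEVELS data
instance (VAR_LEVELS : Int) (TICK_LEVELS : Int) (data : Option (List (List Int))) (out : List (String × List Int)) : Decidable (Spec_getTickCoords VAR_LEVELS TICK_LEVELS data out) := by unfold Spec_getTickCoords; infer_instance

-- ===== CLAIM (what is proved, stated in full; the proofs are below) =====
def Claim_equal_getTickCoords : Prop := ∀ (VAR_LEVELS : Int) (TICK_LEVELS : Int) (data : Option (List (List Int))), Dom_getTickCoords VAR_LEVELS TICK_LEVELS data → Pre_getTickCoords VAR_LEVELS TICK_LEVELS data → Spec_getTickCoords VAR_LEVELS TICK_LEVELS data (getTickCoords VAR_LEVELS TICK_LEVELS data)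

-- ===== LEMMAS AND PROOFS =====

-- the suffixes still to be merged, as B's (list, cursor) state sees them
def pvSuffixes (lists : List (List Int)) (idx : List Nat) : List (List Int) :=
  (lists.zip idx).map (fun p => p.1.drop p.2)

-- B's head-selection scan equals A's selection on the suffix lists (generalized over the
-- position offset and the accumulator)
theorem pvBest_aux (ps : List (List Int × Nat)) : ∀ (k : Nat) (acc : Option (Nat × Int)),
    (ps.zipIdx k).foldl (fun best q =>
      if q.1.2 < q.1.1.length then
        let v := q.1.1.getD q.1.2 0
        match best with
        | none => some (q.2, v)
        | some b => if v < b.2 then some (q.2, v) else some b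
      else best) acc
    = (((ps.map (fun p => p.1.drop p.2)).zipIdx k).filterMap
         (fun p => p.1.head?.map (fun v => (p.2, v)))).foldl (fun acc p =>
      match acc with
      | none => some p
      | some q => if p.2 < q.2 then some p else some q) acc := by
  induction ps with
  | nil => intro k acc; simp
  | cons p ps ih =>
    intro k acc
    simp only [List.map_cons, List.zipIdx_cons, List.foldl_cons, List.filterMap_cons,
      List.head?_drop]
    by_cases h : p.2 < p.1.length
    · have : p.1[p.2]? = some p.1[p.2] := by simp [h]
      rw [this]
      simp only [Option.map_some, if_pos h]
      rw [List.foldl_cons, ih]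
      congr 1
      cases acc with
      | none => simp [this]
      | some b => simp [this]
    · have : p.1[p.2]? = none := by simp; omega
      rw [this]
      simp only [Option.map_none, if_neg h]
      exact ih (k + 1) acc

theorem pvBestB_eq (lists : List (List Int)) (idx : List Nat) :
    pvBestB lists idx = pvSelMinA (pvHeadsA (pvSuffixes lists idx)) := by
  unfold pvBestB pvSelMinA pvHeadsA pvSuffixes
  exact pvBest_aux (lists.zip idx) 0 none

-- advancing cursor j in B's state is tailing list j among the suffixes
theorem pvSuffixes_set (lists : List (List Int)) (idx : List Nat) (j : Nat) :
    pvSuffixes lists (idx.set j (idx.getD j 0 + 1)) = pvTailAt (pvSuffixes lists idx) j := by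
  unfold pvSuffixes pvTailAt
  apply List.ext_getElem
  · simp
  · intro i h1 h2
    simp only [List.getElem_map, List.getElem_zipIdx, List.getElem_zip]
    by_cases hij : i = j
    · subst hij
      have hlt : i < idx.length := by simp at h1; omega
      simp [hlt, List.tail_drop]
    · simp [hij, Ne.symm hij]

theorem pvMergeB_eq (fuel : Nat) (lists : List (List Int)) :
    ∀ idx, pvMergeB fuel lists idx = pvMergeA fuel (pvSuffixes lists idx) := by
  induction fuel with
  | zero => intro idx; rfl
  | succ n ih =>
    intro idx
    show (match pvBestB lists idx with
      | none => []
      | some (j, v) => v :: pvMergeB n lists (idx.set j (idx.getD j 0 + 1))) = _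
    rw [pvBestB_eq]
    cases hsel : pvSelMinA (pvHeadsA (pvSuffixes lists idx)) with
    | none => simp [pvMergeA, hsel]
    | some p =>
      obtain ⟨j, v⟩ := p
      simp only [pvMergeA, hsel, ih, pvSuffixes_set]

theorem pvSuffixes_replicate (lists : List (List Int)) :
    pvSuffixes lists (List.replicate lists.length 0) = lists := by
  induction lists with
  | nil => rfl
  | cons l ls ih => simpa [pvSuffixes, List.replicate_succ] using ih

theorem pvKwayMerge_eq (lists : List (List Int)) :
    pvKwayMerge lists = merge_n_sorted_lists lists := by
  unfold pvKwayMerge merge_n_sorted_lists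
  rw [pvMergeB_eq, pvSuffixes_replicate]

-- ===== VERDICT (by name: the statement is the Claim_ definition above) =====
theorem getTickCoords_spec : Claim_equal_getTickCoords := by
  intro VAR_LEVELS TICK_LEVELS data _ _
  unfold Spec_getTickCoords getTickCoords getTickCoords_alt
  congr 1
  apply PySem.List.foldl_congr_mem
  intro d i _
  simp only [pvAxisTicks, pvKwayMerge_eq, PySem.List.slice?_none_none_neg_one, Option.getD_some]
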